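-- pv_equiv track=rewrite | github.com/kolesnikovvitaliy/pokolenie_python_oop | 2_Повторяем_основные_конструкции_языка/2_1_Задачи/2_1_1_Дартс/darts.py | make_dartboard_1
-- ===== SOURCE A (Python) =====
-- def make_dartboard_1(n):
--     dartboard = []
--     for i in range(n):
--         result =[]
--         for j in range(n):
--             if (i == j and i <= n - 1 - j) or (i <= j and i <= n - 1 - j):
--                 result.append(i+1)
--             elif (i >= j and i <= n - 1 - j):
--                 result.append(j+1)
--             elif (i <= j and i >= n - 1 - j):
--                 result.append(n - j)
--             elif (i >= j and i >= n - 1 - j):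
--                 result.append(n-i)
--             else:
--                 result.append(1)
--         dartboard.append(result)
--     return dartboard
-- ===== SOURCE B (Python) =====
-- def make_dartboard_1(n):
--     # Build only the first ceil(n/2) distinct rows by concatenation
--     # (ascending run, constant middle, mirrored run), then mirror them.
--     if n <= 0:
--         return []
--     half = (n + 1) // 2
--     rows = []
--     for i in range(half):
--         asc = list(range(1, i + 1))
--         rows.append(asc + [i + 1] * (n - 2 * i) + asc[::-1])
--     return rows + rows[:n - half][::-1]
-- ===== Notes on version B (the rewrite author's own statement) =====
-- stated objective: alternative
-- what changed: B builds each of the first ceil(n/2) distinct rows once by concatenating an ascending run, a constant middle block and the mirrored run, then mirrors those rows for the bottom half, instead of A's per-cell four-way branch test over all n*n cells.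
import Mathlib
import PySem

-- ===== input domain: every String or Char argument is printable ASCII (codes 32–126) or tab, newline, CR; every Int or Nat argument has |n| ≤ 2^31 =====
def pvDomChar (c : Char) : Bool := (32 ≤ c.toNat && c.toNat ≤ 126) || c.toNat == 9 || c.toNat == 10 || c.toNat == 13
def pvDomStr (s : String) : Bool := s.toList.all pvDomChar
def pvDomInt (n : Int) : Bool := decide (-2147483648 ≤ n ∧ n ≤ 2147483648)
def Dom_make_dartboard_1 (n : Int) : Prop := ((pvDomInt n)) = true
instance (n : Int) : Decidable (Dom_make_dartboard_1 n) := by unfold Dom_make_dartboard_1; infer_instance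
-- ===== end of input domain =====

-- B builds each distinct row once by concatenation and mirrors; A tests a four-way branch per cell.

-- ===== PORT A =====
-- the body of A's inner if/elif chain, one cell
def pvCellA (n i j : Int) : Int :=
  if (i = j ∧ i ≤ n - 1 - j) ∨ (i ≤ j ∧ i ≤ n - 1 - j) then i + 1
  else if i ≥ j ∧ i ≤ n - 1 - j then j + 1
  else if i ≤ j ∧ i ≥ n - 1 - j then n - j
  else if i ≥ j ∧ i ≥ n - 1 - j then n - i
  else 1

def make_dartboard_1 (n : Int) : List (List Int) :=
  (PySem.List.pyRange 0 n 1).foldl (fun dartboard i =>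
    dartboard ++ [(PySem.List.pyRange 0 n 1).foldl (fun result j =>
      result ++ [pvCellA n i j]) []]) []

-- ===== PORT B =====
-- asc + [i+1]*(n-2*i) + asc[::-1]   ([v]*k with k possibly ≤ 0 is List.replicate k.toNat v, exact)
def pvRowB (n i : Int) : List Int :=
  let asc := PySem.List.pyRange 1 (i + 1) 1
  asc ++ List.replicate (n - 2 * i).toNat (i + 1) ++ asc.reverse

def make_dartboard_1_alt (n : Int) : List (List Int) :=
  if n ≤ 0 then []
  else
    let half := PySem.Int.floordiv (n + 1) 2
    let rows := (PySem.List.pyRange 0 half 1).foldl (fun rows i => rows ++ [pvRowB n i]) []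
    -- rows[:n-half][::-1]; 0 ≤ n-half ≤ len rows, so take is exact here
    rows ++ (rows.take (n - half).toNat).reverse

-- ===== PRECONDITION & SPEC =====
def Spec_make_dartboard_1 (n : Int) (out : List (List Int)) : Prop := out = make_dartboard_1_alt n
instance (n : Int) (out : List (List Int)) : Decidable (Spec_make_dartboard_1 n out) := by unfold Spec_make_dartboard_1; infer_instance

-- ===== CLAIM (what is proved, stated in full; the proofs are below) =====
def Claim_equal_make_dartboard_1 : Prop := ∀ (n : Int), Dom_make_dartboard_1 n → Spec_make_dartboard_1 n (make_dartboard_1 n)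

-- ===== LEMMAS AND PROOFS =====

-- (pyRange a b 1).map (·+1) = pyRange (a+1) (b+1) 1
theorem pvMapSucc (a b : Int) :
    (PySem.List.pyRange a b 1).map (fun x => x + 1) = PySem.List.pyRange (a + 1) (b + 1) 1 := by
  rw [PySem.List.pyRange_one, PySem.List.pyRange_one, List.map_map]
  have h : b + 1 - (a + 1) = b - a := by ring
  rw [h]
  exact List.map_congr_left (fun k _ => by simp; omega)

-- row i of A's board equals B's row pattern for s = min i (n-1-i)
theorem pvRowEq (n i : Int) (h0 : 0 ≤ i) (h1 : i < n) :
    (PySem.List.pyRange 0 n 1).map (pvCellA n i) = pvRowB n (min i (n - 1 - i)) := by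
  set s := min i (n - 1 - i) with hs
  have hs0 : 0 ≤ s := by omega
  have hs1 : 2 * s ≤ n - 1 := by omega
  have hsplit : PySem.List.pyRange 0 n 1 =
      PySem.List.pyRange 0 s 1 ++ PySem.List.pyRange s (n - s) 1 ++ PySem.List.pyRange (n - s) n 1 := by
    rw [← PySem.List.pyRange_one_append 0 s (n - s) (by omega) (by omega),
        ← PySem.List.pyRange_one_append 0 (n - s) n (by omega) (by omega)]
  rw [hsplit, List.map_append, List.map_append]
  unfold pvRowB
  have hA : (PySem.List.pyRange 0 s 1).map (pvCellA n i) = PySem.List.pyRange 1 (s + 1) 1 := by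
    rw [show (PySem.List.pyRange 0 s 1).map (pvCellA n i)
          = (PySem.List.pyRange 0 s 1).map (fun j => j + 1) from
        List.map_congr_left (fun j hj => by
          have := (PySem.List.mem_pyRange_one).1 hj
          unfold pvCellA; split_ifs <;> omega)]
    have := pvMapSucc 0 s
    simpa using this
  have hB : (PySem.List.pyRange s (n - s) 1).map (pvCellA n i)
      = List.replicate (n - 2 * s).toNat (s + 1) := by
    rw [show (PySem.List.pyRange s (n - s) 1).map (pvCellA n i)
          = (PySem.List.pyRange s (n - s) 1).map (fun _ => s + 1) from
        List.map_congr_left (fun j hj => by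
          have := (PySem.List.mem_pyRange_one).1 hj
          unfold pvCellA; split_ifs <;> omega)]
    rw [List.map_const']
    congr 1
    rw [PySem.List.length_pyRange_one]
    omega
  have hC : (PySem.List.pyRange (n - s) n 1).map (pvCellA n i)
      = (PySem.List.pyRange 1 (s + 1) 1).reverse := by
    rw [show (PySem.List.pyRange (n - s) n 1).map (pvCellA n i)
          = (PySem.List.pyRange (n - s) n 1).map (fun j => n - j) from
        List.map_congr_left (fun j hj => by
          have := (PySem.List.mem_pyRange_one).1 hj
          unfold pvCellA; split_ifs <;> omega)]
    have hrev : (PySem.List.pyRange 1 (s + 1) 1).reverse = PySem.List.pyRange s 0 (-1) := by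
      rw [PySem.List.pyRange_neg_one_eq_reverse]
      norm_num
    rw [hrev, PySem.List.pyRange_neg_one, PySem.List.pyRange_one, List.map_map]
    have h : n - (n - s) = s - 0 := by ring
    rw [h]
    exact List.map_congr_left (fun k _ => by simp; omega)
  rw [hA, hB, hC]

theorem make_dartboard_1_eq_map (n : Int) :
    make_dartboard_1 n
      = (PySem.List.pyRange 0 n 1).map (fun i => (PySem.List.pyRange 0 n 1).map (pvCellA n i)) := by
  unfold make_dartboard_1
  rw [show (fun (dartboard : List (List Int)) (i : Int) =>
        dartboard ++ [(PySem.List.pyRange 0 n 1).foldl (fun result j => result ++ [pvCellA n i j]) []])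
      = (fun dartboard i => dartboard ++ [(PySem.List.pyRange 0 n 1).map (pvCellA n i)]) from
    funext fun d => funext fun i => by
      rw [PySem.List.foldl_append_singleton_eq_map]; simp]
  rw [PySem.List.foldl_append_singleton_eq_map]
  simp

-- ===== VERDICT (by name: the statement is the Claim_ definition above) =====
theorem make_dartboard_1_spec : Claim_equal_make_dartboard_1 := by
  intro n _
  unfold Spec_make_dartboard_1 make_dartboard_1_alt
  rw [make_dartboard_1_eq_map]
  by_cases hn : n ≤ 0
  · simp [hn, PySem.List.pyRange_one_eq_nil hn]
  · simp only [hn, if_false]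
    rw [not_le] at hn
    set half := PySem.Int.floordiv (n + 1) 2 with hhalf
    have hhv : half = (n + 1) / 2 := by
      rw [hhalf]
      simp [PySem.Int.floordiv]
      rw [Int.fdiv_eq_ediv]
      omega
    have h0 : 0 ≤ half := by omega
    have h1 : half ≤ n := by omega
    have h2 : n - half ≤ half := by omega
    have h3 : n ≤ 2 * half := by omega
    rw [PySem.List.foldl_append_singleton_eq_map, List.nil_append]
    have hsp : (PySem.List.pyRange 0 n 1).map
          (fun i => (PySem.List.pyRange 0 n 1).map (pvCellA n i))
        = (PySem.List.pyRange 0 half 1).map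
            (fun i => (PySem.List.pyRange 0 n 1).map (pvCellA n i))
          ++ (PySem.List.pyRange half n 1).map
            (fun i => (PySem.List.pyRange 0 n 1).map (pvCellA n i)) := by
      rw [← List.map_append, ← PySem.List.pyRange_one_append 0 half n h0 h1]
    rw [hsp]
    congr 1
    · exact List.map_congr_left (fun i hi => by
        have := (PySem.List.mem_pyRange_one).1 hi
        rw [pvRowEq n i (by omega) (by omega)]
        congr 1
        omega)
    · rw [show (PySem.List.pyRange half n 1).map
            (fun i => (PySem.List.pyRange 0 n 1).map (pvCellA n i))
          = (PySem.List.pyRange half n 1).map (fun i => pvRowB n (n - 1 - i)) from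
        List.map_congr_left (fun i hi => by
          have := (PySem.List.mem_pyRange_one).1 hi
          rw [pvRowEq n i (by omega) (by omega)]
          congr 1
          omega)]
      rw [← List.map_take]
      have htk : (PySem.List.pyRange 0 half 1).take (n - half).toNat
          = PySem.List.pyRange 0 (n - half) 1 := by
        rw [PySem.List.pyRange_one, PySem.List.pyRange_one, ← List.map_take, List.take_range]
        congr 1
        rw [Nat.min_def]
        split_ifs <;> congr 1 <;> omega
      rw [htk, ← List.map_reverse]
      have hrev : (PySem.List.pyRange 0 (n - half) 1).reverse
          = PySem.List.pyRange (n - half - 1) (-1) (-1) := by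
        rw [PySem.List.pyRange_neg_one_eq_reverse]
        norm_num
      rw [hrev, PySem.List.pyRange_neg_one, PySem.List.pyRange_one, List.map_map, List.map_map]
      have h : n - half - 1 - (-1) = n - half := by ring
      rw [h]
      exact List.map_congr_left (fun k _ => by simp; congr 1; omega)
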